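-- pv_equiv track=rewrite | github.com/jessica-writes-code/Advent-of-Code | AoC_2021/Day12/Solution.py | can_go_small_cave
-- ===== SOURCE A (Python) =====
-- from typing import List, Set
--
-- def is_small_cave(identifier: str):
--     return not (identifier in ["start", "end"]) and identifier.lower() == identifier
--
-- def can_go_small_cave(loc: str, current_path: List[str]) -> bool:
--     # If it's not a small cave, it doesn't matter
--     if not is_small_cave(loc):
--         return False
--
--     # If you haven't been before, you can go!
--     if loc not in current_path:
--         return True
--
--     # Otherwise, logic for cave visits
--     small_caves_visited = set([x for x in current_path if is_small_cave(x)])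
--     max_small_cave_visits = max([current_path.count(s) for s in small_caves_visited])
--     if max_small_cave_visits >= 2:
--         return False
--     return True
-- ===== SOURCE B (Python) =====
-- from typing import List, Set
--
-- def is_small_cave(identifier: str):
--     return not (identifier in ["start", "end"]) and identifier.lower() == identifier
--
-- def can_go_small_cave(loc: str, current_path: List[str]) -> bool:
--     # If it's not a small cave, it doesn't matter
--     if not is_small_cave(loc):
--         return False
--
--     # If you haven't been before, you can go!
--     if loc not in current_path:
--         return True
--
--     # One early-exit pass: ok unless some small cave already appears twice
--     seen = set()
--     for x in current_path:
--         if is_small_cave(x):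
--             if x in seen:
--                 return False
--             seen.add(x)
--     return True
-- ===== Notes on version B (the rewrite author's own statement) =====
-- stated objective: simpler
-- what changed: Replaced the set-comprehension plus per-cave count() rescans plus max() with a single early-exit pass that maintains a seen-set and fails on the first repeated small cave.
import Mathlib
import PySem

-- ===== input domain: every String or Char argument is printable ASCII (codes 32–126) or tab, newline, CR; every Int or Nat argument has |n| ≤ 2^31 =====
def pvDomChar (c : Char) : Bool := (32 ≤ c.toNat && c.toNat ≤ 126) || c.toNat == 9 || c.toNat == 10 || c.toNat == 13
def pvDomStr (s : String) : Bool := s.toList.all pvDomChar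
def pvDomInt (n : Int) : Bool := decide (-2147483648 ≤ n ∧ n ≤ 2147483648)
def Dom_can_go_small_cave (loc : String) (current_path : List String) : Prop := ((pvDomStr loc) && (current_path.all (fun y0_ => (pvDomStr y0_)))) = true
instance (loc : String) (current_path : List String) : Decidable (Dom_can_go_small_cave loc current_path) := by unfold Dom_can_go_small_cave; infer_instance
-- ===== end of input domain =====

-- B replaces A's set-comprehension + per-cave count() rescans + max() with one early-exit
-- pass over the path maintaining a seen-set (objective: simpler).


-- ===== PORT A =====
-- shared module helper of both Pythons
def is_small_cave (identifier : String) : Bool :=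
  !(identifier == "start" || identifier == "end") && (PySem.Str.lower identifier == identifier)

def can_go_small_cave (loc : String) (current_path : List String) : Bool :=
  if !is_small_cave loc then false
  else if !(current_path.contains loc) then true
  else
    let small_caves_visited : PySem.Set String :=
      PySem.Set.ofList (current_path.filter (fun x => is_small_cave x))
    let counts : List Int :=
      small_caves_visited.map (fun s => (PySem.List.count current_path s : Int))
    match PySem.List.max? counts (fun x => x) with
    | some m => if m ≥ 2 then false else true
    | none => false  -- Python's max([]) ValueError; unreachable here (loc is small and in the path)

-- ===== PORT B =====
def canGoLoop : List String → PySem.Set String → Bool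
  | [], _ => true
  | x :: rest, seen =>
    if is_small_cave x then
      if PySem.Set.contains seen x then false
      else canGoLoop rest (PySem.Set.add seen x)
    else canGoLoop rest seen

def can_go_small_cave_alt (loc : String) (current_path : List String) : Bool :=
  if !is_small_cave loc then false
  else if !(current_path.contains loc) then true
  else canGoLoop current_path PySem.Set.empty

-- ===== PRECONDITION & SPEC =====
def Spec_can_go_small_cave (loc : String) (current_path : List String) (out : Bool) : Prop := out = can_go_small_cave_alt loc current_path
instance (loc : String) (current_path : List String) (out : Bool) : Decidable (Spec_can_go_small_cave loc current_path out) := by unfold Spec_can_go_small_cave; infer_instance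

-- ===== CLAIM (what is proved, stated in full; the proofs are below) =====
def Claim_equal_can_go_small_cave : Prop := ∀ (loc : String) (current_path : List String), Dom_can_go_small_cave loc current_path → Spec_can_go_small_cave loc current_path (can_go_small_cave loc current_path)

-- ===== LEMMAS AND PROOFS =====

-- B's loop returns true iff the small caves of l are pairwise distinct and none was already seen
theorem canGoLoop_true_iff (l : List String) (seen : PySem.Set String) :
    canGoLoop l seen = true ↔
      (l.filter (fun x => is_small_cave x)).Nodup ∧
        ∀ x ∈ l, is_small_cave x = true → x ∉ seen := by
  induction l generalizing seen with
  | nil => simp [canGoLoop]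
  | cons x rest ih =>
    rw [canGoLoop]
    by_cases hx : is_small_cave x = true
    · rw [List.filter_cons_of_pos hx, if_pos hx]
      by_cases hs : x ∈ seen
      · rw [if_pos ((PySem.Set.contains_iff seen x).mpr hs)]
        simp only [Bool.false_eq_true, false_iff, not_and]
        intro _ h
        exact h x (List.mem_cons_self ..) hx hs
      · rw [if_neg (fun hc => hs ((PySem.Set.contains_iff seen x).mp hc)), ih]
        constructor
        · rintro ⟨hnd, hall⟩
          refine ⟨List.nodup_cons.mpr ⟨fun hxr => ?_, hnd⟩, ?_⟩
          · exact hall x (List.mem_of_mem_filter hxr) hx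
              ((PySem.Set.mem_add seen x x).mpr (Or.inr rfl))
          · intro y hy hsy
            rcases List.mem_cons.mp hy with rfl | hy
            · exact hs
            · exact fun hmem => hall y hy hsy ((PySem.Set.mem_add seen x y).mpr (Or.inl hmem))
        · rintro ⟨hnd, hall⟩
          have hnd' := List.nodup_cons.mp hnd
          refine ⟨hnd'.2, fun y hy hsy hmem => ?_⟩
          rcases (PySem.Set.mem_add seen x y).mp hmem with hmem' | rfl
          · exact hall y (List.mem_cons_of_mem _ hy) hsy hmem'
          · exact hnd'.1 (List.mem_filter.mpr ⟨hy, hsy⟩)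
    · rw [List.filter_cons_of_neg (by simpa using hx), if_neg hx, ih]
      constructor
      · rintro ⟨hnd, hall⟩
        refine ⟨hnd, fun y hy hsy => ?_⟩
        rcases List.mem_cons.mp hy with rfl | hy
        · exact absurd hsy hx
        · exact hall y hy hsy
      · rintro ⟨hnd, hall⟩
        exact ⟨hnd, fun y hy => hall y (List.mem_cons_of_mem _ hy)⟩

-- ===== VERDICT (by name: the statement is the Claim_ definition above) =====
theorem can_go_small_cave_spec : Claim_equal_can_go_small_cave := by
  intro loc path _
  unfold Spec_can_go_small_cave can_go_small_cave can_go_small_cave_alt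
  by_cases h1 : is_small_cave loc = true
  · by_cases h2 : path.contains loc = true
    · have h2' : loc ∈ path := List.mem_of_elem_eq_true h2
      rw [if_neg (by simp [h1]), if_neg (by simp [h2']),
          if_neg (by simp [h1]), if_neg (by simp [h2'])]
      set f := path.filter (fun x => is_small_cave x) with hf
      have hlf : loc ∈ f := List.mem_filter.mpr ⟨h2', h1⟩
      have hset : loc ∈ PySem.Set.ofList f := (PySem.Set.mem_ofList _ _).mpr hlf
      set counts : List Int :=
        (PySem.Set.ofList f).map (fun s => (PySem.List.count path s : Int)) with hc
      obtain ⟨m, hm⟩ : ∃ m, PySem.List.max? counts (fun x => x) = some m := by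
        cases h : PySem.List.max? counts (fun x => x) with
        | some m => exact ⟨m, rfl⟩
        | none =>
          have : counts = [] := (PySem.List.max?_eq_none_iff ..).mp h
          rw [hc, List.map_eq_nil_iff] at this
          rw [this] at hset
          exact (List.not_mem_nil hset).elim
      show (match PySem.List.max? counts (fun x => x) with
            | some m => if m ≥ 2 then false else true
            | none => false) = canGoLoop path PySem.Set.empty
      rw [hm]
      show (if m ≥ 2 then false else true) = canGoLoop path PySem.Set.empty
      -- characterise B's loop as "the small caves of path are pairwise distinct"
      have hloop : canGoLoop path PySem.Set.empty = true ↔ f.Nodup := by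
        rw [canGoLoop_true_iff]
        simp [PySem.Set.empty, hf]
      by_cases hge : m ≥ 2
      · rw [if_pos hge]
        symm; rw [← Bool.not_eq_true, hloop]
        intro hnd
        obtain ⟨s, hsmem, hsm⟩ := List.mem_map.mp (hc ▸ PySem.List.max?_mem hm)
        have hsf : s ∈ f := (PySem.Set.mem_ofList _ _).mp hsmem
        have hsmall : is_small_cave s = true := (List.mem_filter.mp hsf).2
        have hcnt : f.count s = path.count s := List.count_filter hsmall
        have hle : f.count s ≤ 1 := List.nodup_iff_count_le_one.mp hnd s
        rw [PySem.List.count_eq] at hsm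
        omega
      · rw [if_neg hge]
        symm; rw [hloop, List.nodup_iff_count_le_one]
        intro s
        by_cases hsf : s ∈ f
        · have hsmall : is_small_cave s = true := (List.mem_filter.mp hsf).2
          have hmem : ((PySem.List.count path s : Int)) ∈ counts :=
            hc ▸ List.mem_map.mpr ⟨s, (PySem.Set.mem_ofList _ _).mpr hsf, rfl⟩
          have := PySem.List.max?_isMax hm _ hmem
          have hcnt : f.count s = path.count s := List.count_filter hsmall
          rw [PySem.List.count_eq] at this
          omega
        · rw [List.count_eq_zero.mpr hsf]; omega
    · have h2' : loc ∉ path := fun h => h2 (List.elem_eq_true_of_mem h)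
      simp [h1, h2']
  · simp [h1]
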